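-- pv_equiv track=rewrite | github.com/JannaKim/JavaPythonAlgoStudy | 2021/5_May_2021/210508/42840_모의고사/42840_210508_MinJaeKim.py | solution
-- ===== SOURCE A (Python) =====
-- def solution(answers):
--     one=[1,2,3,4,5]
--     two=[2,1,2,3,2,4,2,5]
--     three=[3,3,1,1,2,2,4,4,5,5]
--     a= 5
--     b= 8
--     c= 10
--     n= len(answers)
--     answer = [0]*3
--     for i in range(n):
--         if one[i%a]==answers[i]:
--             answer[0]+=1
--         if two[i%b]==answers[i]:
--             answer[1]+=1
--         if three[i%c]==answers[i]:
--             answer[2]+=1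
--
--     ans=[]
--     mx= max(answer)
--     for i in range(3):
--         if answer[i]==mx:
--             ans.append(i+1)
--
--     return ans
-- ===== SOURCE B (Python) =====
-- def solution(answers):
--     def score(pattern):
--         total = 0
--         rest = list(pattern)
--         for a in answers:
--             if not rest:
--                 rest = list(pattern)
--             if rest.pop(0) == a:
--                 total += 1
--         return total
--     answer = [score([1, 2, 3, 4, 5]),
--               score([2, 1, 2, 3, 2, 4, 2, 5]),
--               score([3, 3, 1, 1, 2, 2, 4, 4, 5, 5])]
--     mx = max(answer)
--     return [i + 1 for i in range(3) if answer[i] == mx]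
-- ===== Notes on version B (the rewrite author's own statement) =====
-- stated objective: alternative
-- what changed: A's single interleaved index loop with i%5/i%8/i%10 pattern lookups and an in-place 3-counter list is replaced by a scoring helper run as three independent passes over answers, each carrying a rotating remainder of its pattern (pop-and-refill cycle, no modulo indexing), followed by a filter comprehension for the winners.
import Mathlib
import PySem

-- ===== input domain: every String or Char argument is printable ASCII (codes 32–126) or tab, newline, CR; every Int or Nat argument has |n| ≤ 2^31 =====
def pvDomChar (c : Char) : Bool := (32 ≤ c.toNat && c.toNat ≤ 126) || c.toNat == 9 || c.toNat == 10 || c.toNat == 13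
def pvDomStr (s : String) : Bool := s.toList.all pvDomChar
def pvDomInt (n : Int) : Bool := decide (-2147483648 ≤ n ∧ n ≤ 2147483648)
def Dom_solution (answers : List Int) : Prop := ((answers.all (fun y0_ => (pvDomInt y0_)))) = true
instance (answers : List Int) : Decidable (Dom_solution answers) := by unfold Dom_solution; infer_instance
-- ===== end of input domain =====

-- B scores each fixed pattern in its own pass over answers, cycling a rotating remainder of the
-- pattern instead of A's interleaved modulo-indexed loop; same results, same O(n) cost (alternative).


-- ===== PORT A =====
-- A's mutable 3-element counter list 'answer' is carried as an Int triple; max(answer) via PySem.List.max?.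
def solution (answers : List Int) : List Int :=
  let one : List Int := [1, 2, 3, 4, 5]
  let two : List Int := [2, 1, 2, 3, 2, 4, 2, 5]
  let three : List Int := [3, 3, 1, 1, 2, 2, 4, 4, 5, 5]
  let a : Int := 5
  let b : Int := 8
  let c : Int := 10
  let n : Int := (answers.length : Int)
  let answer :=
    (PySem.List.pyRange 0 n 1).foldl
      (fun (s : Int × Int × Int) i =>
        let s := if PySem.List.pyGetD one (PySem.Int.mod i a) 0 = PySem.List.pyGetD answers i 0
                 then (s.1 + 1, s.2.1, s.2.2) else s
        let s := if PySem.List.pyGetD two (PySem.Int.mod i b) 0 = PySem.List.pyGetD answers i 0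
                 then (s.1, s.2.1 + 1, s.2.2) else s
        if PySem.List.pyGetD three (PySem.Int.mod i c) 0 = PySem.List.pyGetD answers i 0
        then (s.1, s.2.1, s.2.2 + 1) else s)
      (0, 0, 0)
  let answerL : List Int := [answer.1, answer.2.1, answer.2.2]
  let mx : Int := (PySem.List.max? answerL (fun v => v)).getD 0
  (PySem.List.pyRange 0 3 1).foldl
    (fun ans i => if PySem.List.pyGetD answerL i 0 = mx then ans ++ [i + 1] else ans) []

-- ===== PORT B =====
-- Source B's score(): one pass over answers with state (total, rest); rest.pop(0) with refill when empty.
-- The '[] => ' match arm is unreachable for the nonempty patterns used (pop(0) would raise only on pattern = []).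
def scoreFold (pattern : List Int) (answers : List Int) : Int :=
  (answers.foldl
    (fun (st : Int × List Int) a =>
      let rest := if st.2.isEmpty then pattern else st.2
      match rest with
      | [] => (st.1, [])
      | h :: t => (if h = a then st.1 + 1 else st.1, t))
    (0, pattern)).1

def solution_alt (answers : List Int) : List Int :=
  let answer : List Int :=
    [scoreFold [1, 2, 3, 4, 5] answers,
     scoreFold [2, 1, 2, 3, 2, 4, 2, 5] answers,
     scoreFold [3, 3, 1, 1, 2, 2, 4, 4, 5, 5] answers]
  let mx : Int := (PySem.List.max? answer (fun v => v)).getD 0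
  ((PySem.List.pyRange 0 3 1).filter (fun i => PySem.List.pyGetD answer i 0 = mx)).map
    (fun i => i + 1)

-- ===== PRECONDITION & SPEC =====
def Spec_solution (answers : List Int) (out : List Int) : Prop := out = solution_alt answers
instance (answers : List Int) (out : List Int) : Decidable (Spec_solution answers out) := by unfold Spec_solution; infer_instance

-- ===== CLAIM (what is proved, stated in full; the proofs are below) =====
def Claim_equal_solution : Prop := ∀ (answers : List Int), Dom_solution answers → Spec_solution answers (solution answers)

-- ===== LEMMAS AND PROOFS =====

-- Reference count: matches of a pattern (read from position r, wrapping) against a suffix of answers.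
def cntA (pat : List Int) : Nat → List Int → Int
  | _, [] => 0
  | r, x :: xs =>
      (if pat.getD r 0 = x then 1 else 0) +
        cntA pat (if r + 1 = pat.length then 0 else r + 1) xs

-- B's rotating-remainder fold computes cntA.
lemma scoreFold_inv (pat : List Int) :
    ∀ (as : List Int) (r : Nat) (total : Int) (rest : List Int),
      r < pat.length → (rest = pat.drop r ∨ (rest = [] ∧ r = 0)) →
      (as.foldl
        (fun (st : Int × List Int) a =>
          let rest := if st.2.isEmpty then pat else st.2
          match rest with
          | [] => (st.1, [])
          | h :: t => (if h = a then st.1 + 1 else st.1, t))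
        (total, rest)).1 = total + cntA pat r as := by
  intro as
  induction as with
  | nil => intro r total rest _ _; simp [cntA]
  | cons a as ih =>
    intro r total rest hr hrest
    have hd : pat.drop r = pat.getD r 0 :: pat.drop (r + 1) := by
      rw [List.drop_eq_getElem_cons hr, List.getD_eq_getElem pat 0 hr]
    have hrest' : (if rest.isEmpty then pat else rest) = pat.getD r 0 :: pat.drop (r + 1) := by
      rcases hrest with h | ⟨h1, h2⟩
      · have hne : rest ≠ [] := by rw [h, hd]; exact List.cons_ne_nil _ _
        rw [if_neg (by simpa [List.isEmpty_iff] using hne), h, hd]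
      · subst h1; subst h2; simpa using hd
    simp only [List.foldl_cons, hrest']
    have hstep :
        (cntA pat r (a :: as)) =
          (if pat.getD r 0 = a then 1 else 0) +
            cntA pat (if r + 1 = pat.length then 0 else r + 1) as := rfl
    by_cases hwrap : r + 1 = pat.length
    · have htail : pat.drop (r + 1) = [] := by rw [hwrap]; simp
      have := ih 0 (if pat.getD r 0 = a then total + 1 else total) (pat.drop (r + 1))
        (by omega) (Or.inr ⟨htail, rfl⟩)
      simp only [this, hstep, if_pos hwrap]
      split_ifs <;> ring
    · have := ih (r + 1) (if pat.getD r 0 = a then total + 1 else total) (pat.drop (r + 1))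
        (by omega) (Or.inl rfl)
      simp only [this, hstep, if_neg hwrap]
      split_ifs <;> ring

lemma scoreFold_eq (pat : List Int) (hp : pat ≠ []) (answers : List Int) :
    scoreFold pat answers = cntA pat 0 answers := by
  have := scoreFold_inv pat answers 0 0 pat
    (List.length_pos_of_ne_nil hp) (Or.inl (by simp))
  simpa [scoreFold] using this

-- A's interleaved modulo-indexed fold computes the three cntA counts.
lemma foldA_inv (answers : List Int) :
    ∀ (fuel j : Nat), answers.length - j = fuel → ∀ (x y z : Int),
      (PySem.List.pyRange (j : Int) ((answers.length : Nat) : Int) 1).foldl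
        (fun (s : Int × Int × Int) i =>
          let s := if PySem.List.pyGetD [1, 2, 3, 4, 5] (PySem.Int.mod i 5) 0 = PySem.List.pyGetD answers i 0
                   then (s.1 + 1, s.2.1, s.2.2) else s
          let s := if PySem.List.pyGetD [2, 1, 2, 3, 2, 4, 2, 5] (PySem.Int.mod i 8) 0 = PySem.List.pyGetD answers i 0
                   then (s.1, s.2.1 + 1, s.2.2) else s
          if PySem.List.pyGetD [3, 3, 1, 1, 2, 2, 4, 4, 5, 5] (PySem.Int.mod i 10) 0 = PySem.List.pyGetD answers i 0
          then (s.1, s.2.1, s.2.2 + 1) else s)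
        (x, y, z)
      = (x + cntA [1, 2, 3, 4, 5] (j % 5) (answers.drop j),
         y + cntA [2, 1, 2, 3, 2, 4, 2, 5] (j % 8) (answers.drop j),
         z + cntA [3, 3, 1, 1, 2, 2, 4, 4, 5, 5] (j % 10) (answers.drop j)) := by
  intro fuel
  induction fuel with
  | zero =>
    intro j hj x y z
    have hle : answers.length ≤ j := by omega
    rw [PySem.List.pyRange_one_eq_nil (by exact_mod_cast hle)]
    simp [List.drop_eq_nil_of_le hle, cntA]
  | succ k ih =>
    intro j hj x y z
    have hjlt : j < answers.length := by omega
    rw [PySem.List.pyRange_one_cons (by exact_mod_cast hjlt)]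
    have e5 : PySem.Int.mod (j : Int) 5 = ((j % 5 : Nat) : Int) := by
      exact_mod_cast PySem.Int.mod_natCast j 5
    have e8 : PySem.Int.mod (j : Int) 8 = ((j % 8 : Nat) : Int) := by
      exact_mod_cast PySem.Int.mod_natCast j 8
    have e10 : PySem.Int.mod (j : Int) 10 = ((j % 10 : Nat) : Int) := by
      exact_mod_cast PySem.Int.mod_natCast j 10
    have ecast : ((j : Int) + 1) = (((j + 1 : Nat)) : Int) := by push_cast; ring
    have hdrop : answers.drop j = answers[j] :: answers.drop (j + 1) :=
      List.drop_eq_getElem_cons hjlt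
    have hget : answers.getD j 0 = answers[j] := List.getD_eq_getElem answers 0 hjlt
    simp only [List.foldl_cons, e5, e8, e10, ecast, PySem.List.pyGetD_natCast,
      ih (j + 1) (by omega), hdrop, hget, cntA]
    have m5 : (if j % 5 + 1 = ([1, 2, 3, 4, 5] : List Int).length then 0 else j % 5 + 1) = (j + 1) % 5 := by
      simp only [List.length_cons, List.length_nil]; split_ifs with h <;> omega
    have m8 : (if j % 8 + 1 = ([2, 1, 2, 3, 2, 4, 2, 5] : List Int).length then 0 else j % 8 + 1) = (j + 1) % 8 := by
      simp only [List.length_cons, List.length_nil]; split_ifs with h <;> omega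
    have m10 : (if j % 10 + 1 = ([3, 3, 1, 1, 2, 2, 4, 4, 5, 5] : List Int).length then 0 else j % 10 + 1) = (j + 1) % 10 := by
      simp only [List.length_cons, List.length_nil]; split_ifs with h <;> omega
    rw [m5, m8, m10]
    split_ifs <;> simp only [Prod.mk.injEq] <;> refine ⟨by ring, by ring, by ring⟩

-- Winner selection: A's appending fold over range(3) equals B's filter/map comprehension.
lemma tail_eq (x y z mx : Int) :
    (PySem.List.pyRange 0 3 1).foldl
      (fun (ans : List Int) i => if PySem.List.pyGetD [x, y, z] i 0 = mx then ans ++ [i + 1] else ans) []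
    = ((PySem.List.pyRange 0 3 1).filter (fun i => PySem.List.pyGetD [x, y, z] i 0 = mx)).map
        (fun i => i + 1) := by
  have h3 : PySem.List.pyRange 0 3 1 = [0, 1, 2] := by decide
  rw [h3]
  simp only [List.foldl_cons, List.foldl_nil, List.filter]
  split_ifs <;> simp_all

-- ===== VERDICT (by name: the statement is the Claim_ definition above) =====
theorem solution_spec : Claim_equal_solution := by
  intro answers _
  have hA := foldA_inv answers answers.length 0 (by omega) 0 0 0
  simp only [Nat.cast_zero, Nat.zero_mod, List.drop_zero, zero_add] at hA
  unfold Spec_solution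
  simp only [solution, solution_alt]
  rw [hA,
      scoreFold_eq [1, 2, 3, 4, 5] (by simp) answers,
      scoreFold_eq [2, 1, 2, 3, 2, 4, 2, 5] (by simp) answers,
      scoreFold_eq [3, 3, 1, 1, 2, 2, 4, 4, 5, 5] (by simp) answers]
  exact tail_eq _ _ _ _
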